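-- pv_equiv track=rewrite | github.com/0x12th/leetcode-and-others | leetcode-easy/1876.py | count_good_substrings_2
-- ===== SOURCE A (Python) =====
-- import collections
-- from typing import DefaultDict
--
-- def count_good_substrings_2(s: str) -> int:
--     dct: DefaultDict[str, int] = collections.defaultdict(int)
--     left, result = 0, 0
--
--     for right, value in enumerate(s):
--         dct[value] += 1
--         if right - left == 3:
--             dct[s[left]] -= 1
--             if dct[s[left]] == 0:
--                 del dct[s[left]]
--             left += 1
--
--         if len(dct) == 3:
--             result += 1
--
--     return result
-- ===== SOURCE B (Python) =====
-- def count_good_substrings_2(s: str) -> int: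
--     result = 0
--     for i in range(len(s) - 2):
--         a, b, c = s[i], s[i + 1], s[i + 2]
--         if a != b and a != c and b != c:
--             result += 1
--     return result
-- ===== Notes on version B (the rewrite author's own statement) =====
-- stated objective: simpler
-- what changed: Replaced the incrementally maintained sliding-window counter dict (left pointer, decrement and key deletion per step) by a stateless scan that checks each length-3 window's three characters directly for pairwise distinctness.
import Mathlib
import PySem

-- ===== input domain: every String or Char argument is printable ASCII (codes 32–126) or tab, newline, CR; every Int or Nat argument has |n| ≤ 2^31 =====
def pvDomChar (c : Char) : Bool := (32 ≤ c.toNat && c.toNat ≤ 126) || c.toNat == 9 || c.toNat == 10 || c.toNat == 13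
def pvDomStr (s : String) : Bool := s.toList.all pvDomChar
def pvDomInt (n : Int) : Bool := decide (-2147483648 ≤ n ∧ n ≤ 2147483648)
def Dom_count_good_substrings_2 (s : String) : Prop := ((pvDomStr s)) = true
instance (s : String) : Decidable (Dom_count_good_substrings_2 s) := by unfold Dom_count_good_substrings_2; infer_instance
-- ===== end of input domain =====

-- B replaces A's incrementally maintained sliding-window counter dict (left pointer,
-- decrement, key deletion) by a stateless direct distinctness check of each length-3
-- window (objective: simpler).

-- ===== PORT A =====
-- one iteration of A's for-loop; state = (dct, left, result), rv = (right, value)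
def pvStepA (l : List Char) (st : PySem.Dict Char Int × Int × Int) (rv : Int × Char) :
    PySem.Dict Char Int × Int × Int :=
  let dct0 := st.1.modify rv.2 0 (· + 1)
  let q :=
    if rv.1 - st.2.1 == 3 then
      let lc := PySem.List.pyGetD l st.2.1 default
      let d1 := dct0.modify lc 0 (· - 1)
      let d2 := if d1.getD lc 0 == 0 then d1.erase lc else d1
      (d2, st.2.1 + 1)
    else (dct0, st.2.1)
  (q.1, q.2, if q.1.size == 3 then st.2.2 + 1 else st.2.2)

def count_good_substrings_2 (s : String) : Int :=
  let l := s.toList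
  ((PySem.List.enumerate l).foldl (pvStepA l) (PySem.Dict.empty, 0, 0)).2.2

-- ===== PORT B =====
def count_good_substrings_2_alt (s : String) : Int :=
  let l := s.toList
  (PySem.List.pyRange 0 (PySem.List.len l - 2)).foldl
    (fun result i =>
      let a := PySem.List.pyGetD l i default
      let b := PySem.List.pyGetD l (i + 1) default
      let c := PySem.List.pyGetD l (i + 2) default
      if a ≠ b ∧ a ≠ c ∧ b ≠ c then result + 1 else result) 0

-- ===== PRECONDITION & SPEC =====
def Spec_count_good_substrings_2 (s : String) (out : Int) : Prop := out = count_good_substrings_2_alt s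
instance (s : String) (out : Int) : Decidable (Spec_count_good_substrings_2 s out) := by unfold Spec_count_good_substrings_2; infer_instance

-- ===== CLAIM (what is proved, stated in full; the proofs are below) =====
def Claim_equal_count_good_substrings_2 : Prop := ∀ (s : String), Dom_count_good_substrings_2 s → Spec_count_good_substrings_2 s (count_good_substrings_2 s)

-- ===== LEMMAS AND PROOFS =====

def pvRep (m : PySem.Dict Char Int) (w : List Char) : Prop :=
  m.keys.Nodup ∧ (∀ c, m.getD c 0 = (w.count c : Int)) ∧ (∀ c, m.contains c = true ↔ c ∈ w)

theorem pvRep_empty : pvRep PySem.Dict.empty [] := by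
  refine ⟨?_, ?_, ?_⟩ <;> simp [PySem.Dict.empty, PySem.Dict.keys, PySem.Dict.getD,
    PySem.Dict.get?, PySem.Dict.contains]

theorem pvRep_add (m : PySem.Dict Char Int) (w : List Char) (d : Char) (h : pvRep m w) :
    pvRep (m.modify d 0 (· + 1)) (w ++ [d]) := by
  obtain ⟨h1, h2, h3⟩ := h
  refine ⟨?_, ?_, ?_⟩
  · rw [PySem.Dict.modify]; exact PySem.Dict.nodup_keys_insert _ _ _ h1
  · intro c
    rw [PySem.Dict.getD_modify]
    rcases eq_or_ne c d with hc | hc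
    · simp [hc, h2, List.count_append]
    · simp [hc, h2, List.count_append, List.count_singleton, Ne.symm hc]
  · intro c
    rw [PySem.Dict.contains_modify]
    by_cases hc : c = d <;> simp [hc, h3]

theorem pvFind?_filter_ne (xs : List (Char × Int)) (k c : Char) :
    List.find? (fun p => p.1 == c) (List.filter (fun p => !(p.1 == k)) xs)
      = if c = k then none else List.find? (fun p => p.1 == c) xs := by
  induction xs with
  | nil => simp
  | cons x xs ih =>
    by_cases hx : x.1 = k
    · by_cases hc : c = k <;> simp [List.find?_cons, hx, hc, ih, Ne.symm]
    · by_cases hxc : x.1 = c <;> by_cases hc : c = k <;>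
        simp_all [List.find?_cons]

theorem pvErase_getD (d : PySem.Dict Char Int) (k c : Char) :
    (d.erase k).getD c 0 = if c = k then 0 else d.getD c 0 := by
  rw [PySem.Dict.getD, PySem.Dict.get?, PySem.Dict.erase]
  rw [show ({ items := List.filter (fun p => !p.1 == k) d.items } : PySem.Dict Char Int).items
      = List.filter (fun p => !(p.1 == k)) d.items from rfl]
  rw [pvFind?_filter_ne]
  by_cases hc : c = k <;> simp [hc, PySem.Dict.getD, PySem.Dict.get?]

theorem pvErase_contains (d : PySem.Dict Char Int) (k c : Char) :
    (d.erase k).contains c = if c = k then false else d.contains c := by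
  rw [PySem.Dict.contains, PySem.Dict.erase]
  by_cases hc : c = k
  · simp [hc, List.any_filter]
  · simp only [hc, if_false, List.any_filter, PySem.Dict.contains]
    congr 1; funext p
    by_cases hp : p.1 = k <;> simp [hp, hc, Ne.symm hc]

theorem pvErase_nodup (d : PySem.Dict Char Int) (k : Char) (h : d.keys.Nodup) :
    (d.erase k).keys.Nodup := by
  rw [PySem.Dict.keys, PySem.Dict.erase]
  exact List.Nodup.sublist (List.Sublist.map _ List.filter_sublist) h

theorem pvRep_remove (m : PySem.Dict Char Int) (a : Char) (u : List Char) (h : pvRep m (a :: u)) :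
    pvRep (let d1 := m.modify a 0 (· - 1);
           if d1.getD a 0 == 0 then d1.erase a else d1) u := by
  obtain ⟨h1, h2, h3⟩ := h
  have hd1nodup : (m.modify a 0 (· - 1)).keys.Nodup := by
    rw [PySem.Dict.modify]; exact PySem.Dict.nodup_keys_insert _ _ _ h1
  have key : ∀ c, (m.modify a 0 (· - 1)).getD c 0 = (u.count c : Int) := by
    intro c
    rw [PySem.Dict.getD_modify]
    rcases eq_or_ne c a with hc | hc
    · subst hc; rw [h2, List.count_cons]; simp
    · simp [hc, h2, List.count_cons, Ne.symm hc]
  have kcont : ∀ c, (m.modify a 0 (· - 1)).contains c = (c == a || m.contains c) :=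
    fun c => PySem.Dict.contains_modify m a c 0 _
  by_cases hz : ((m.modify a 0 (· - 1)).getD a 0 == 0) = true
  · have hza : u.count a = 0 := by
      have h0 := key a; rw [(beq_iff_eq).1 hz] at h0; exact_mod_cast h0.symm
    have hna : a ∉ u := by exact List.count_eq_zero.1 hza
    simp only [hz, if_true]
    refine ⟨pvErase_nodup _ _ hd1nodup, ?_, ?_⟩
    · intro c
      rw [pvErase_getD]
      rcases eq_or_ne c a with hc | hc
      · simp [hc, hza]
      · simp [hc, key]
    · intro c
      rw [pvErase_contains]
      rcases eq_or_ne c a with hc | hc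
      · simp [hc, hna]
      · rw [if_neg hc, kcont, Bool.or_eq_true, h3]
        simp [hc, List.mem_cons]
  · have hza : u.count a ≠ 0 := by
      intro h0
      exact hz (beq_iff_eq.2 (by rw [key a, h0]; simp))
    have hma : a ∈ u := List.count_pos_iff.1 (Nat.pos_of_ne_zero hza)
    rw [if_neg hz]
    refine ⟨hd1nodup, key, ?_⟩
    intro c
    rw [kcont]
    rcases eq_or_ne c a with hc | hc
    · simp [hc, hma]
    · rw [Bool.or_eq_true, h3]
      simp [hc, List.mem_cons]

theorem pvRep_size (m : PySem.Dict Char Int) (w : List Char) (h : pvRep m w) :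
    m.size = (PySem.List.dedup w).length := by
  obtain ⟨h1, h2, h3⟩ := h
  have hperm : m.keys.Perm (PySem.List.dedup w) := by
    rw [List.perm_ext_iff_of_nodup h1 (by simp [PySem.List.dedup, PySem.Set.nodup_ofList])]
    intro c
    rw [← PySem.Dict.contains_iff_mem_keys, h3]
    simp [PySem.List.dedup, PySem.Set.mem_ofList]
  have : m.keys.length = (PySem.List.dedup w).length := hperm.length_eq
  simpa [PySem.Dict.size, PySem.Dict.keys] using this


def pvGood3 (w : List Char) : Bool :=
  match w with
  | [a, b, c] => decide (a ≠ b ∧ a ≠ c ∧ b ≠ c)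
  | _ => false

def pvWin (p : List Char) : List Char := (p.drop (p.length - 3)).take 3

def pvTripleAt (l : List Char) (i : Nat) : List Char := (l.drop i).take 3

def pvCnt (l : List Char) : Nat := (List.range (l.length - 2)).countP (fun i => pvGood3 (pvTripleAt l i))

theorem pvGood3_card (w : List Char) (h : w.length = 3) :
    ((PySem.List.dedup w).length = 3) ↔ pvGood3 w = true := by
  match w, h with
  | [a, b, c], _ =>
    by_cases h1 : a = b <;> by_cases h2 : a = c <;> by_cases h3 : b = c <;>
      simp_all [pvGood3, PySem.List.dedup, PySem.Set.ofList, PySem.Set.add, PySem.Set.contains, List.foldl] <;> (split_ifs <;> simp_all <;> aesop)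


theorem pvGood3_len (w : List Char) (h : w.length ≠ 3) : pvGood3 w = false := by
  match w with
  | [] => rfl
  | [_] => rfl
  | [_, _] => rfl
  | [_, _, _] => simp at h
  | _ :: _ :: _ :: _ :: _ => rfl

theorem pvWin_length (p : List Char) : (pvWin p).length = min p.length 3 := by
  simp [pvWin]; omega

theorem pvTripleAt_append (p : List Char) (d : Char) (i : Nat) (h : i + 3 ≤ p.length) :
    pvTripleAt (p ++ [d]) i = pvTripleAt p i := by
  unfold pvTripleAt
  rw [List.drop_append_of_le_length (by omega)]
  rw [List.take_append_of_le_length (by simp; omega)]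

theorem pvCnt_append (p : List Char) (d : Char) :
    pvCnt (p ++ [d]) = pvCnt p + (if pvGood3 (pvWin (p ++ [d])) then 1 else 0) := by
  by_cases hn : p.length ≥ 2
  · have hlen : (p ++ [d]).length - 2 = (p.length - 2) + 1 := by simp; omega
    unfold pvCnt
    rw [hlen, List.range_succ, List.countP_append]
    have h1 : (List.range (p.length - 2)).countP (fun i => pvGood3 (pvTripleAt (p ++ [d]) i))
        = (List.range (p.length - 2)).countP (fun i => pvGood3 (pvTripleAt p i)) := by
      apply List.countP_congr
      intro i hi
      rw [List.mem_range] at hi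
      rw [pvTripleAt_append p d i (by omega)]
    have h2 : pvTripleAt (p ++ [d]) (p.length - 2) = pvWin (p ++ [d]) := by
      unfold pvTripleAt pvWin
      rw [show (p ++ [d]).length - 3 = p.length - 2 from by simp]
    rw [h1]
    have h3 : List.countP (fun i => pvGood3 (pvTripleAt (p ++ [d]) i)) [p.length - 2]
        = if pvGood3 (pvWin (p ++ [d])) then 1 else 0 := by
      simp only [List.countP_cons, List.countP_nil, h2, Nat.zero_add]
    rw [h3]
  · have hg : pvGood3 (pvWin (p ++ [d])) = false := by
      apply pvGood3_len
      rw [pvWin_length]; simp; omega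
    have h0 : (p ++ [d]).length - 2 = 0 := by simp; omega
    have h0' : p.length - 2 = 0 := by omega
    simp [pvCnt, h0, h0', hg]
    intro a ha; omega

theorem pvTripleAt_elems (l : List Char) (k : Nat) (h : k + 2 < l.length) :
    pvTripleAt l k = [l.getD k default, l.getD (k + 1) default, l.getD (k + 2) default] := by
  unfold pvTripleAt
  rw [List.drop_eq_getElem_cons (show k < l.length by omega),
      List.drop_eq_getElem_cons (show k + 1 < l.length by omega),
      List.drop_eq_getElem_cons (show k + 2 < l.length by omega)]
  rw [List.getD_eq_getElem l default (show k < l.length by omega),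
      List.getD_eq_getElem l default (show k + 1 < l.length by omega),
      List.getD_eq_getElem l default (show k + 2 < l.length by omega)]
  simp only [List.take_succ_cons, List.take_zero]

theorem pvFoldCount (xs : List Int) (Q : Int → Prop) [DecidablePred Q] (acc : Int) :
    xs.foldl (fun r i => if Q i then r + 1 else r) acc = acc + ((xs.countP (fun i => decide (Q i))) : Int) := by
  induction xs generalizing acc with
  | nil => simp
  | cons x xs ih =>
    by_cases hf : Q x <;> simp [List.countP_cons, hf, ih] <;> ring

theorem pvAlt_eq (l : List Char) :
    (PySem.List.pyRange 0 (PySem.List.len l - 2)).foldl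
      (fun result i =>
        let a := PySem.List.pyGetD l i default
        let b := PySem.List.pyGetD l (i + 1) default
        let c := PySem.List.pyGetD l (i + 2) default
        if a ≠ b ∧ a ≠ c ∧ b ≠ c then result + 1 else result) 0 = (pvCnt l : Int) := by
  show (PySem.List.pyRange 0 (PySem.List.len l - 2)).foldl
      (fun result i =>
        if PySem.List.pyGetD l i default ≠ PySem.List.pyGetD l (i + 1) default ∧
           PySem.List.pyGetD l i default ≠ PySem.List.pyGetD l (i + 2) default ∧
           PySem.List.pyGetD l (i + 1) default ≠ PySem.List.pyGetD l (i + 2) default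
        then result + 1 else result) 0 = (pvCnt l : Int)
  rw [pvFoldCount]
  rw [PySem.List.pyRange_one, List.countP_map]
  have harg : (PySem.List.len l - 2 - 0).toNat = l.length - 2 := by
    simp [PySem.List.len]; omega
  rw [harg]
  unfold pvCnt
  norm_num
  apply List.countP_congr
  intro k hk
  rw [List.mem_range] at hk
  have h2 : k + 2 < l.length := by omega
  simp only [Function.comp, zero_add]
  rw [show ((k : Int) + 1) = ((k + 1 : Nat) : Int) from by push_cast; ring,
      show ((k : Int) + 2) = ((k + 2 : Nat) : Int) from by push_cast; ring]
  simp only [PySem.List.pyGetD_natCast]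
  rw [pvTripleAt_elems l k h2]
  simp [pvGood3]

theorem pvWin_small (p : List Char) (h : p.length ≤ 3) : pvWin p = p := by
  unfold pvWin
  rw [Nat.sub_eq_zero_of_le h, List.drop_zero]
  exact List.take_of_length_le h

theorem pvWin_cons (p : List Char) (h3 : 3 ≤ p.length) :
    pvWin p = p.getD (p.length - 3) default :: p.drop (p.length - 2) := by
  unfold pvWin
  rw [List.drop_eq_getElem_cons (show p.length - 3 < p.length by omega), List.take_succ_cons]
  rw [show p.length - 3 + 1 = p.length - 2 from by omega]
  rw [List.take_of_length_le (by rw [List.length_drop]; omega)]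
  rw [List.getD_eq_getElem _ _ (by omega)]

theorem pvWin_append_big (p : List Char) (d : Char) (h3 : 3 ≤ p.length) :
    pvWin (p ++ [d]) = p.drop (p.length - 2) ++ [d] := by
  unfold pvWin
  rw [show (p ++ [d]).length - 3 = p.length - 2 from by simp]
  rw [List.drop_append_of_le_length (by omega)]
  rw [List.take_of_length_le (by simp [List.length_drop]; omega)]

theorem pvAdd_len (s : List Char) (x : Char) : (PySem.Set.add s x).length ≤ s.length + 1 := by
  rw [PySem.Set.add]
  split_ifs <;> simp

theorem pvFoldAdd_len (w : List Char) : ∀ (s : List Char),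
    (w.foldl PySem.Set.add s).length ≤ s.length + w.length := by
  induction w with
  | nil => intro s; simp
  | cons x w ih =>
    intro s
    calc ((x :: w).foldl PySem.Set.add s).length = (w.foldl PySem.Set.add (PySem.Set.add s x)).length := by simp
    _ ≤ (PySem.Set.add s x).length + w.length := ih _
    _ ≤ s.length + 1 + w.length := by have := pvAdd_len s x; omega
    _ = s.length + (x :: w).length := by simp; omega

theorem pvDedup_le (w : List Char) : (PySem.List.dedup w).length ≤ w.length := by
  have h := pvFoldAdd_len w []
  simpa [PySem.List.dedup, PySem.Set.ofList_eq_foldl] using h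



theorem pvSizeCond (m : PySem.Dict Char Int) (p : List Char) (d : Char)
    (hrep : pvRep m (pvWin (p ++ [d]))) :
    (m.size == 3) = pvGood3 (pvWin (p ++ [d])) := by
  rw [pvRep_size m _ hrep]
  by_cases h3 : 3 ≤ (p ++ [d]).length
  · have hw : (pvWin (p ++ [d])).length = 3 := by rw [pvWin_length]; omega
    by_cases hg : pvGood3 (pvWin (p ++ [d])) = true
    · rw [hg]; exact beq_iff_eq.2 ((pvGood3_card _ hw).2 hg)
    · have hgf : pvGood3 (pvWin (p ++ [d])) = false := by simpa using hg
      rw [hgf, beq_eq_false_iff_ne]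
      intro hc; exact hg ((pvGood3_card _ hw).1 hc)
  · have hw : (pvWin (p ++ [d])).length ≤ 2 := by rw [pvWin_length]; omega
    have hle := pvDedup_le (pvWin (p ++ [d]))
    have hg : pvGood3 (pvWin (p ++ [d])) = false := pvGood3_len _ (by omega)
    rw [hg, beq_eq_false_iff_ne]
    omega

theorem pvLoopA (l : List Char) : ∀ (t p : List Char) (m : PySem.Dict Char Int) (left res : Int),
    l = p ++ t → pvRep m (pvWin p) →
    left = ((p.length - 3 : Nat) : Int) → res = (pvCnt p : Int) →
    ((PySem.List.enumerate t (p.length : Int)).foldl (pvStepA l) (m, left, res)).2.2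
      = (pvCnt l : Int) := by
  intro t
  induction t with
  | nil =>
    intro p m left res hl hm hleft hres
    rw [List.append_nil] at hl
    subst hl
    simpa [PySem.List.enumerate] using hres
  | cons d t' ih =>
    intro p m left res hl hm hleft hres
    subst hleft; subst hres
    rw [PySem.List.enumerate_cons, List.foldl_cons]
    have hl' : l = (p ++ [d]) ++ t' := by rw [hl]; simp
    have hlen' : ((p.length : Int) + 1) = (((p ++ [d]).length : Nat) : Int) := by simp
    by_cases h3 : 3 ≤ p.length
    · -- the window is full: A removes s[left] after inserting d
      have hcond : ((p.length : Int) - ((p.length - 3 : Nat) : Int) == 3) = true := by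
        rw [beq_iff_eq]; omega
      have hlcval : PySem.List.pyGetD l ((p.length - 3 : Nat) : Int) default
          = p.getD (p.length - 3) default := by
        rw [PySem.List.pyGetD_natCast, hl]
        simp [List.getD_eq_getElem?_getD,
          List.getElem?_append_left (show p.length - 3 < p.length by omega)]
      have hwcons : pvWin p = p.getD (p.length - 3) default :: p.drop (p.length - 2) :=
        pvWin_cons p h3
      have hwin' : pvWin (p ++ [d]) = p.drop (p.length - 2) ++ [d] := pvWin_append_big p d h3
      have hrep1 : pvRep (m.modify d 0 (· + 1)) ((p.getD (p.length - 3) default :: p.drop (p.length - 2)) ++ [d]) := by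
        rw [← hwcons]; exact pvRep_add _ _ _ hm
      rw [List.cons_append] at hrep1
      have hrep2 := pvRep_remove _ (p.getD (p.length - 3) default) _ hrep1
      rw [← hwin'] at hrep2
      have hstep : pvStepA l (m, ((p.length - 3 : Nat) : Int), (pvCnt p : Int)) ((p.length : Int), d)
          = (let d1 := (m.modify d 0 (· + 1)).modify (p.getD (p.length - 3) default) 0 (· - 1)
             let d2 := if d1.getD (p.getD (p.length - 3) default) 0 == 0
                       then d1.erase (p.getD (p.length - 3) default) else d1
             (d2, (((p ++ [d]).length - 3 : Nat) : Int),
              (pvCnt (p ++ [d]) : Int))) := by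
        simp only [pvStepA, hcond, hlcval, if_true]
        refine Prod.ext ?_ (Prod.ext ?_ ?_)
        · rfl
        · simp; omega
        · rw [pvSizeCond _ p d hrep2, pvCnt_append p d]
          by_cases hg : pvGood3 (pvWin (p ++ [d])) = true <;> simp [hg]
      rw [hstep, hlen']
      exact ih (p ++ [d]) _ _ _ hl' hrep2 rfl rfl
    · -- window not yet full: no removal
      have hcond : ((p.length : Int) - ((p.length - 3 : Nat) : Int) == 3) = false := by
        rw [beq_eq_false_iff_ne]; omega
      have hwin' : pvWin (p ++ [d]) = pvWin p ++ [d] := by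
        rw [pvWin_small p (by omega), pvWin_small (p ++ [d]) (by simp; omega)]
      have hrep1 : pvRep (m.modify d 0 (· + 1)) (pvWin (p ++ [d])) := by
        rw [hwin']; exact pvRep_add _ _ _ hm
      have hstep : pvStepA l (m, ((p.length - 3 : Nat) : Int), (pvCnt p : Int)) ((p.length : Int), d)
          = (m.modify d 0 (· + 1), (((p ++ [d]).length - 3 : Nat) : Int),
             (pvCnt (p ++ [d]) : Int)) := by
        simp only [pvStepA, hcond, Bool.false_eq_true, if_false]
        refine Prod.ext ?_ (Prod.ext ?_ ?_)
        · rfl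
        · simp; omega
        · rw [pvSizeCond _ p d hrep1, pvCnt_append p d]
          by_cases hg : pvGood3 (pvWin (p ++ [d])) = true <;> simp [hg]
      rw [hstep, hlen']
      exact ih (p ++ [d]) _ _ _ hl' hrep1 rfl rfl

-- ===== VERDICT (by name: the statement is the Claim_ definition above) =====
theorem count_good_substrings_2_spec : Claim_equal_count_good_substrings_2 := by
  intro s _
  show _ = _
  unfold count_good_substrings_2 count_good_substrings_2_alt
  rw [pvAlt_eq]
  simpa using pvLoopA s.toList s.toList [] PySem.Dict.empty 0 0 (by simp) pvRep_empty (by simp) (by simp [pvCnt])
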